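-- pv_equiv track=rewrite | github.com/mikehankey/amscams | pipeline/lib/Remaster.py | dir_info
-- ===== SOURCE A (Python) =====
-- def dir_info(frame_data):
--    first_x = None
--    last_x= None
--    for fn, cnts in frame_data:
--       if first_x is None:
--          if len(cnts) > 0:
--             first_x = cnts[0][0]
--             first_y = cnts[0][1]
--       if len(cnts) > 0:
--          last_x = cnts[0][0]
--          last_y = cnts[0][1]
--    if last_x is not None:
--       x_diff = first_x - last_x
--       y_diff = first_y - last_y
--    else:
--       x_diff = 0
--       y_diff = 0
--    if abs(x_diff) > abs(y_diff):
--       dom_dir = "x"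
--    else:
--       dom_dir = "y"
--    if x_diff > 0:
--       x_dir = "right_to_left"
--    else:
--       x_dir = "left_to_right"
--    if y_diff > 0:
--       y_dir = "down_to_up"
--    else:
--       y_dir = "up_to_down"
--    return(dom_dir, x_dir, y_dir)
-- ===== SOURCE B (Python) =====
-- def dir_info(frame_data):
--    first = None
--    for fn, cnts in frame_data:
--       if len(cnts) > 0:
--          first = cnts[0]
--          break
--    last = None
--    for fn, cnts in reversed(frame_data):
--       if len(cnts) > 0:
--          last = cnts[0]
--          break
--    if first is not None and last is not None:
--       x_diff = first[0] - last[0]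
--       y_diff = first[1] - last[1]
--    else:
--       x_diff = 0
--       y_diff = 0
--    dom_dir = "x" if abs(x_diff) > abs(y_diff) else "y"
--    x_dir = "right_to_left" if x_diff > 0 else "left_to_right"
--    y_dir = "down_to_up" if y_diff > 0 else "up_to_down"
--    return (dom_dir, x_dir, y_dir)
-- ===== Notes on version B (the rewrite author's own statement) =====
-- stated objective: simpler
-- what changed: Replaces the single full-pass accumulation of first/last non-empty entries with two early-exit directional scans (forward for the first, reversed for the last), then the same direction logic.
import Mathlib
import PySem

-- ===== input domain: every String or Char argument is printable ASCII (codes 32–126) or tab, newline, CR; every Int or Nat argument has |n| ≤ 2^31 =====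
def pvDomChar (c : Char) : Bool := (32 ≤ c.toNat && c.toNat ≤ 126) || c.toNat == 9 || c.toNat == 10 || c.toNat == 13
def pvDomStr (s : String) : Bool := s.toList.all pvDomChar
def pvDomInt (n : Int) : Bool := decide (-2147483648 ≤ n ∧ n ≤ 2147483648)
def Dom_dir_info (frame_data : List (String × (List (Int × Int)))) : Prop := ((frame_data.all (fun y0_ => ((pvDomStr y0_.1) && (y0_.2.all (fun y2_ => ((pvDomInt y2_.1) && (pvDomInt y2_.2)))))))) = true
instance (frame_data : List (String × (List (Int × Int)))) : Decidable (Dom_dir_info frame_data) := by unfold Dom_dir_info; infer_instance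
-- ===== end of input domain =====

-- B replaces A's single full-pass first/last accumulation with two early-exit scans
-- (forward for the first non-empty entry, reversed for the last); objective: simpler.


-- ===== PORT A =====
-- one fold over frame_data carrying (first_x,first_y) and (last_x,last_y) as options,
-- exactly A's loop: first set only when still None, last overwritten on every non-empty cnts
def dir_info (frame_data : List (String × (List (Int × Int)))) : String × String × String :=
  let st := frame_data.foldl
    (fun (st : Option (Int × Int) × Option (Int × Int)) p =>
      let first := match st.1 with
        | none => if p.2.length > 0 then some p.2.headI else none
        | some v => some v
      let last := if p.2.length > 0 then some p.2.headI else st.2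
      (first, last)) (none, none)
  let d : Int × Int := match st.1, st.2 with
    | some f, some l => (f.1 - l.1, f.2 - l.2)
    | _, _ => (0, 0)
  let dom_dir := if |d.1| > |d.2| then "x" else "y"
  let x_dir := if d.1 > 0 then "right_to_left" else "left_to_right"
  let y_dir := if d.2 > 0 then "down_to_up" else "up_to_down"
  (dom_dir, x_dir, y_dir)

-- ===== PORT B =====
-- early-exit scan: first entry with non-empty cnts
def firstHit : List (String × (List (Int × Int))) → Option (Int × Int)
  | [] => none
  | p :: rest => match p.2 with
    | c :: _ => some c
    | [] => firstHit rest

def dir_info_alt (frame_data : List (String × (List (Int × Int)))) : String × String × String :=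
  let first := firstHit frame_data
  let last := firstHit frame_data.reverse
  let d : Int × Int :=
    match first with
    | some f =>
      match last with
      | some l => (f.1 - l.1, f.2 - l.2)
      | none => (0, 0)
    | none => (0, 0)
  let dom_dir := if |d.1| > |d.2| then "x" else "y"
  let x_dir := if d.1 > 0 then "right_to_left" else "left_to_right"
  let y_dir := if d.2 > 0 then "down_to_up" else "up_to_down"
  (dom_dir, x_dir, y_dir)

-- ===== PRECONDITION & SPEC =====
def Spec_dir_info (frame_data : List (String × (List (Int × Int)))) (out : String × String × String) : Prop := out = dir_info_alt frame_data
instance (frame_data : List (String × (List (Int × Int)))) (out : String × String × String) : Decidable (Spec_dir_info frame_data out) := by unfold Spec_dir_info; infer_instance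

-- ===== CLAIM (what is proved, stated in full; the proofs are below) =====
def Claim_equal_dir_info : Prop := ∀ (frame_data : List (String × (List (Int × Int)))), Dom_dir_info frame_data → Spec_dir_info frame_data (dir_info frame_data)

-- ===== LEMMAS AND PROOFS =====

-- the per-entry contribution: some cnts[0] if non-empty, else none
def hit (p : String × (List (Int × Int))) : Option (Int × Int) :=
  match p.2 with
  | c :: _ => some c
  | [] => none

theorem firstHit_cons (p : String × (List (Int × Int))) (rest : List (String × (List (Int × Int)))) :
    firstHit (p :: rest) = (hit p).orElse (fun _ => firstHit rest) := by
  cases h : p.2 <;> simp [firstHit, hit, h]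

theorem firstHit_append (xs ys : List (String × (List (Int × Int)))) :
    firstHit (xs ++ ys) = (firstHit xs).orElse (fun _ => firstHit ys) := by
  induction xs with
  | nil => simp [firstHit]
  | cons p rest ih =>
      rw [List.cons_append, firstHit_cons, firstHit_cons, ih]
      cases hit p <;> simp

theorem foldl_state (fd : List (String × (List (Int × Int))))
    (f0 l0 : Option (Int × Int)) :
    fd.foldl
      (fun (st : Option (Int × Int) × Option (Int × Int)) p =>
        let first := match st.1 with
          | none => if p.2.length > 0 then some p.2.headI else none
          | some v => some v
        let last := if p.2.length > 0 then some p.2.headI else st.2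
        (first, last)) (f0, l0)
    = (f0.orElse (fun _ => firstHit fd), (firstHit fd.reverse).orElse (fun _ => l0)) := by
  induction fd generalizing f0 l0 with
  | nil => simp [firstHit]
  | cons p rest ih =>
      rw [List.foldl_cons, ih]
      have hrev : firstHit ((p :: rest).reverse) =
          (firstHit rest.reverse).orElse (fun _ => hit p) := by
        rw [List.reverse_cons, firstHit_append, firstHit_cons]
        simp [firstHit]
      rw [hrev, firstHit_cons]
      cases h : p.2 with
      | nil =>
          cases f0 <;> cases hf : firstHit rest.reverse <;>
            simp [hit, h]
      | cons c cs =>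
          cases f0 <;> cases hf : firstHit rest.reverse <;>
            simp [hit, h]

-- ===== VERDICT (by name: the statement is the Claim_ definition above) =====
theorem dir_info_spec : Claim_equal_dir_info := by
  intro fd _
  unfold Spec_dir_info dir_info dir_info_alt
  rw [foldl_state]
  cases hf : firstHit fd <;> cases hl : firstHit fd.reverse <;> simp
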